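-- pv_equiv track=rewrite | github.com/Felimartinez1/Departamentos-Buenos-Aires | preprocessing/detection.py | hay_muebles_en_contexto
-- ===== SOURCE A (Python) =====
-- def hay_muebles_en_contexto(texto: str, palabra_base="mueble", contextos=None, ventana=8) -> bool:
--     if contextos is None:
--         contextos = ["cocina", "baño", "mesada", "guardado"]
--     palabras = texto.split()
--     for i, palabra in enumerate(palabras):
--         if palabra_base in palabra:
--             contexto = palabras[max(i - ventana, 0): min(i + ventana + 1, len(palabras))]
--             if any(ctx in contexto for ctx in contextos):
--                 return True
--     return False
-- ===== SOURCE B (Python) =====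
-- def hay_muebles_en_contexto(texto: str, palabra_base="mueble", contextos=None, ventana=8) -> bool:
--     if contextos is None:
--         contextos = ["cocina", "baño", "mesada", "guardado"]
--     palabras = texto.split()
--     base_pos = [i for i, p in enumerate(palabras) if palabra_base in p]
--     ctx_pos = [i for i, p in enumerate(palabras) if p in contextos]
--     return any(abs(b - c) <= ventana for b in base_pos for c in ctx_pos)
-- ===== Notes on version B (the rewrite author's own statement) =====
-- stated objective: alternative
-- what changed: B builds two position indexes in one pass over the words (substring hits of palabra_base, exact matches of contextos) and answers by the proximity test |b-c| <= ventana, instead of A's per-hit window slicing with a repeated any() scan over contextos.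
-- outside the precondition, e.g. on hay_muebles_en_contexto('mueble a b cocina e', 'mueble', None, -2): A returns True, B returns False
import Mathlib
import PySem

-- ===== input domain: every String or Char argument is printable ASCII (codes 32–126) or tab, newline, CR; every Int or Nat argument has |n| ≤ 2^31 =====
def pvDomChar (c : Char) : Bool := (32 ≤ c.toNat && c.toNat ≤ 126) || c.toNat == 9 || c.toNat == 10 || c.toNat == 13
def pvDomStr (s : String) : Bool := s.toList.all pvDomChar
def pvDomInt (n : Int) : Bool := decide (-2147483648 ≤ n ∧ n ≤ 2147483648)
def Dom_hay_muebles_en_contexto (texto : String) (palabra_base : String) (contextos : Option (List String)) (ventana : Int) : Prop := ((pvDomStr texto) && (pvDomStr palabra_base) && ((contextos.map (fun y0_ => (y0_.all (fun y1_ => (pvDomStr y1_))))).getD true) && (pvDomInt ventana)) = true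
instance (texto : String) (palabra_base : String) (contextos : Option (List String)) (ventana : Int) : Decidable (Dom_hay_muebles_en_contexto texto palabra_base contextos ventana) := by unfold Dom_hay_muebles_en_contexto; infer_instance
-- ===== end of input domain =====

-- B builds two position indexes (base-substring hits, exact context matches) in one pass and answers
-- by the proximity test |b-c| ≤ ventana, replacing A's per-hit window slicing with repeated any() scans.


-- ===== PORT A =====
def hay_muebles_en_contexto (texto : String) (palabra_base : String) (contextos : Option (List String)) (ventana : Int) : Bool :=
  let ctxs := contextos.getD ["cocina", "baño", "mesada", "guardado"]
  let palabras := PySem.Str.split₀ texto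
  (PySem.List.enumerate palabras 0).any (fun ip =>
    if PySem.Str.isIn palabra_base ip.2 then
      let contexto := PySem.List.slice palabras (some (max (ip.1 - ventana) 0))
        (some (min (ip.1 + ventana + 1) ((palabras.length : Int))))
      ctxs.any (fun ctx => contexto.contains ctx)
    else
      false)

-- ===== PORT B =====
def hay_muebles_en_contexto_alt (texto : String) (palabra_base : String) (contextos : Option (List String)) (ventana : Int) : Bool :=
  let ctxs := contextos.getD ["cocina", "baño", "mesada", "guardado"]
  let palabras := PySem.Str.split₀ texto
  let base_pos := (PySem.List.enumerate palabras 0).filterMap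
    (fun ip => if PySem.Str.isIn palabra_base ip.2 then some ip.1 else none)
  let ctx_pos := (PySem.List.enumerate palabras 0).filterMap
    (fun ip => if ctxs.contains ip.2 then some ip.1 else none)
  base_pos.any (fun b => ctx_pos.any (fun c => decide (|b - c| ≤ ventana)))

-- ===== PRECONDITION & SPEC =====
-- Pre_ excludes negative ventana (outside the task's natural domain of window sizes): there A's slice
-- stop min(i+ventana+1, n) can become a negative index that wraps to the end of the word list,
-- accidentally matching far-away contexts, while B's proximity test naturally finds nothing.
def Pre_hay_muebles_en_contexto (texto : String) (palabra_base : String) (contextos : Option (List String)) (ventana : Int) : Prop := 0 ≤ ventana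
instance (texto : String) (palabra_base : String) (contextos : Option (List String)) (ventana : Int) : Decidable (Pre_hay_muebles_en_contexto texto palabra_base contextos ventana) := by unfold Pre_hay_muebles_en_contexto; infer_instance

def pvWitness_hay_muebles_en_contexto : String × String × Option (List String) × Int := ("mueble x cocina", "mueble", none, 8)

def Spec_hay_muebles_en_contexto (texto : String) (palabra_base : String) (contextos : Option (List String)) (ventana : Int) (out : Bool) : Prop := out = hay_muebles_en_contexto_alt texto palabra_base contextos ventana
instance (texto : String) (palabra_base : String) (contextos : Option (List String)) (ventana : Int) (out : Bool) : Decidable (Spec_hay_muebles_en_contexto texto palabra_base contextos ventana out) := by unfold Spec_hay_muebles_en_contexto; infer_instance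

-- ===== CLAIM (what is proved, stated in full; the proofs are below) =====
def Claim_equal_hay_muebles_en_contexto : Prop := ∀ (texto : String) (palabra_base : String) (contextos : Option (List String)) (ventana : Int), Dom_hay_muebles_en_contexto texto palabra_base contextos ventana → Pre_hay_muebles_en_contexto texto palabra_base contextos ventana → Spec_hay_muebles_en_contexto texto palabra_base contextos ventana (hay_muebles_en_contexto texto palabra_base contextos ventana)

-- ===== LEMMAS AND PROOFS =====

-- Membership in A's window slice around position k, characterized by index proximity (0 ≤ v).
lemma window_mem (ps : List String) (v : Int) (hv : 0 ≤ v) (k : Nat) (_hk : k < ps.length) (x : String) :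
    (x ∈ PySem.List.slice ps (some (max ((k : Int) - v) 0))
      (some (min ((k : Int) + v + 1) ((ps.length : Int))))) ↔
    ∃ (j : Nat), ∃ (hj : j < ps.length), ps[j] = x ∧ |(k : Int) - (j : Int)| ≤ v := by
  have ha : (0:Int) ≤ max ((k:Int) - v) 0 := le_max_right _ _
  have hb : (0:Int) ≤ min ((k:Int) + v + 1) ((ps.length : Int)) := by
    refine le_min (by positivity) (Int.natCast_nonneg _)
  rw [PySem.List.slice_toNat ps ha hb]
  have hA : ((max ((k:Int) - v) 0).toNat : Int) = max ((k:Int) - v) 0 := Int.toNat_of_nonneg ha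
  have hB : ((min ((k:Int) + v + 1) ((ps.length : Int))).toNat : Int) = min ((k:Int) + v + 1) ((ps.length : Int)) := Int.toNat_of_nonneg hb
  set A := (max ((k:Int) - v) 0).toNat with hAdef
  set B := (min ((k:Int) + v + 1) ((ps.length : Int))).toNat with hBdef
  constructor
  · intro hx
    rw [List.mem_iff_getElem?] at hx
    obtain ⟨j, hj⟩ := hx
    rw [List.getElem?_take] at hj
    by_cases hjt : j < B - A
    · rw [if_pos hjt, List.getElem?_drop, List.getElem?_eq_some_iff] at hj
      obtain ⟨hlt, heq⟩ := hj
      refine ⟨A + j, hlt, heq, ?_⟩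
      rw [abs_le]
      constructor <;> omega
    · rw [if_neg hjt] at hj; exact absurd hj (by simp)
  · rintro ⟨j, hj, hje, hjd⟩
    rw [abs_le] at hjd
    rw [List.mem_iff_getElem?]
    refine ⟨j - A, ?_⟩
    rw [List.getElem?_take, if_pos (by omega), List.getElem?_drop, List.getElem?_eq_some_iff]
    have hAj : A + (j - A) = j := by omega
    refine ⟨by omega, ?_⟩
    have : ps[A + (j - A)]'(by omega) = ps[j] := by simp [hAj]
    rw [this, hje]

-- ===== VERDICT (by name: the statement is the Claim_ definition above) =====
theorem hay_muebles_en_contexto_spec : Claim_equal_hay_muebles_en_contexto := by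
  intro texto palabra_base contextos ventana _hdom hv
  unfold Spec_hay_muebles_en_contexto hay_muebles_en_contexto hay_muebles_en_contexto_alt
  set ctxs := contextos.getD ["cocina", "baño", "mesada", "guardado"] with hctxs
  set ps := PySem.Str.split₀ texto with hps
  rw [Bool.eq_iff_iff]
  simp only [List.any_eq_true, List.mem_filterMap, PySem.List.mem_enumerate_iff, zero_add]
  constructor
  · rintro ⟨⟨i, p⟩, ⟨k, hk, hkp⟩, hcond⟩
    cases hkp
    simp only at hcond
    split_ifs at hcond with hbase
    simp only [List.any_eq_true] at hcond
    obtain ⟨ctx, hctx, hmem⟩ := hcond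
    rw [List.contains_eq_mem, decide_eq_true_eq] at hmem
    rw [window_mem ps ventana hv k hk ctx] at hmem
    obtain ⟨j, hj, hje, hjd⟩ := hmem
    refine ⟨(k : Int), ⟨⟨((k : Int), ps[k]), ⟨k, hk, rfl⟩, by rw [if_pos hbase]⟩, ?_⟩⟩
    refine ⟨(j : Int), ⟨⟨((j : Int), ps[j]), ⟨j, hj, rfl⟩, ?_⟩, ?_⟩⟩
    · rw [if_pos (show ctxs.contains ps[j] = true by
        rw [List.contains_eq_mem, decide_eq_true_eq, hje]; exact hctx)]
    · exact decide_eq_true hjd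
  · rintro ⟨b, ⟨⟨i, p⟩, ⟨k, hk, hkp⟩, hb⟩, hrest⟩
    cases hkp
    split_ifs at hb with hbase
    injection hb with hb; subst hb
    obtain ⟨c, ⟨⟨i2, q⟩, ⟨j, hj, hjq⟩, hc⟩, hdist⟩ := hrest
    cases hjq
    split_ifs at hc with hctx
    injection hc with hc; subst hc
    refine ⟨((k : Int), ps[k]), ⟨k, hk, rfl⟩, ?_⟩
    rw [if_pos hbase]
    simp only [List.any_eq_true]
    rw [List.contains_eq_mem, decide_eq_true_eq] at hctx
    refine ⟨ps[j], hctx, ?_⟩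
    rw [List.contains_eq_mem, decide_eq_true_eq, window_mem ps ventana hv k hk ps[j]]
    exact ⟨j, hj, rfl, of_decide_eq_true hdist⟩
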